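-- pv_equiv track=rewrite | github.com/nicl7004/Computer-Security | written2/vigenère.py | modOccurances
-- ===== SOURCE A (Python) =====
-- def modOccurances(occuranceInfo):
--     '''Take the contents returned from repLocations and use it
--     to find the different spacing of collisions for all repeating patterns.
--
--     Do this using the mod function to determine the keylength
--     (factor) that is most common between all repitions.'''
--
--     keys = range(3,21)
--     dictSpace = {}
--     for key in keys:
--         listSpaces = []
--         for each in occuranceInfo:
--             for index in occuranceInfo[each]:
--                 if int(index)%int(key) == 0 and (index>0):
--                     listSpaces.append(index)
--         dictSpace[key] = len(listSpaces)
--     return dictSpace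
-- ===== SOURCE B (Python) =====
-- def modOccurances(occuranceInfo):
--     '''Aggregate first: build a frequency table of the positive indices in one pass
--     over the data, then answer each key length 3..20 by summing the multiplicities
--     of the distinct values divisible by it (no per-key rescan of the raw data).'''
--     freq = {}
--     for each in occuranceInfo:
--         for index in occuranceInfo[each]:
--             if index > 0:
--                 freq[index] = freq.get(index, 0) + 1
--     dictSpace = {}
--     for key in range(3, 21):
--         dictSpace[key] = sum(count for value, count in freq.items() if value % key == 0)
--     return dictSpace
-- ===== Notes on version B (the rewrite author's own statement) =====
-- stated objective: faster
-- what changed: B replaces A's 18 full scans of the raw index data (each materialising a list) with a two-stage hash aggregation: one pass builds a frequency table of the positive indices, then each key 3..20 is answered from the distinct values only, weighted by multiplicity.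
import Mathlib
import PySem

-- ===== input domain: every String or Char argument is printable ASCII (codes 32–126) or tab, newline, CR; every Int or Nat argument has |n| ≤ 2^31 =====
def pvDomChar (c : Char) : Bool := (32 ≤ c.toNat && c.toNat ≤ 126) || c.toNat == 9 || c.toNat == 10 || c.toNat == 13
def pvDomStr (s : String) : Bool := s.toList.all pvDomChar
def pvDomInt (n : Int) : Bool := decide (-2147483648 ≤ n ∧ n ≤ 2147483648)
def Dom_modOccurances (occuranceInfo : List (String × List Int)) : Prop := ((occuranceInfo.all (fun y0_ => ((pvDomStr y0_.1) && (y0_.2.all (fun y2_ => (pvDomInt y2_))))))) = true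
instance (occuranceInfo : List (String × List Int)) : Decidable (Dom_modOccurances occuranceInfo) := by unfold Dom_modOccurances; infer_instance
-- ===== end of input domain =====

-- B aggregates the positive indices into a frequency table in one pass, then answers each
-- key 3..20 from the distinct values weighted by multiplicity; objective: faster (measured).

-- ===== PORT A =====
-- A's parameter is a Python dict: represented as PySem.Dict.ofList of the assoc list;
-- 'for each in occuranceInfo' iterates its keys, 'occuranceInfo[each]' is getD (key always present).
def modOccurances (occuranceInfo : List (String × List Int)) : List (Int × Int) :=
  let d := PySem.Dict.ofList occuranceInfo
  (((PySem.List.pyRange 3 21 1).foldl (fun dictSpace key =>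
      let listSpaces : List Int :=
        (PySem.Dict.keys d).foldl (fun ls each =>
          (PySem.Dict.getD d each []).foldl (fun ls index =>
            if PySem.Int.mod index key == 0 && decide (index > 0) then ls ++ [index] else ls) ls) []
      PySem.Dict.insert dictSpace key (PySem.List.len listSpaces))
    (PySem.Dict.empty : PySem.Dict Int Int))).items

-- ===== PORT B =====
-- freq[index] = freq.get(index, 0) + 1 → Dict.insert with getD; the generator sum is a foldl over items.
def modOccurances_alt (occuranceInfo : List (String × List Int)) : List (Int × Int) :=
  let d := PySem.Dict.ofList occuranceInfo
  let freq : PySem.Dict Int Int :=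
    (PySem.Dict.keys d).foldl (fun f each =>
      (PySem.Dict.getD d each []).foldl (fun f index =>
        if decide (index > 0) then PySem.Dict.insert f index (PySem.Dict.getD f index 0 + 1) else f) f)
      PySem.Dict.empty
  (((PySem.List.pyRange 3 21 1).foldl (fun dictSpace key =>
      PySem.Dict.insert dictSpace key
        (freq.items.foldl (fun s p => if PySem.Int.mod p.1 key == 0 then s + p.2 else s) 0))
    (PySem.Dict.empty : PySem.Dict Int Int))).items

-- ===== PRECONDITION & SPEC =====
def Spec_modOccurances (occuranceInfo : List (String × List Int)) (out : List (Int × Int)) : Prop := out = modOccurances_alt occuranceInfo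
instance (occuranceInfo : List (String × List Int)) (out : List (Int × Int)) : Decidable (Spec_modOccurances occuranceInfo out) := by unfold Spec_modOccurances; infer_instance

-- ===== CLAIM (what is proved, stated in full; the proofs are below) =====
def Claim_equal_modOccurances : Prop := ∀ (occuranceInfo : List (String × List Int)), Dom_modOccurances occuranceInfo → Spec_modOccurances occuranceInfo (modOccurances occuranceInfo)

-- ===== LEMMAS AND PROOFS =====

-- A's test 'int(index) % int(key) == 0 and index > 0'
def pvCond (index key : Int) : Bool := PySem.Int.mod index key == 0 && decide (index > 0)

def pvKS : List Int := PySem.List.pyRange 3 21 1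

-- A's two inner loops build [] ++ the concatenation of the per-entry filtered lists
theorem pvA_listSpaces (d : PySem.Dict String (List Int)) (key : Int) :
    ∀ (es : List String) (ls0 : List Int),
      es.foldl (fun ls each =>
          (PySem.Dict.getD d each []).foldl (fun ls index =>
            if pvCond index key then ls ++ [index] else ls) ls) ls0
        = ls0 ++ es.flatMap (fun e => (PySem.Dict.getD d e []).filter (fun i => pvCond i key)) := by
  intro es
  induction es with
  | nil => intro ls0; simp
  | cons a es ih =>
      intro ls0
      rw [List.foldl_cons, PySem.List.foldl_append_if_eq_filter, ih]
      simp [List.flatMap_cons]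

-- a fold over one entry after another is a fold over the flattened index data
theorem pvFoldl_flatMap {α : Type} (d : PySem.Dict String (List Int)) (g : α → Int → α) :
    ∀ (es : List String) (a : α),
      es.foldl (fun a e => (PySem.Dict.getD d e []).foldl g a) a
        = (es.flatMap (fun e => PySem.Dict.getD d e [])).foldl g a := by
  intro es
  induction es with
  | nil => intro a; simp
  | cons e es ih => intro a; simp [List.flatMap_cons, List.foldl_append, ih]

-- B's first stage is Counter(positive indices) (as a Dict built by get-then-insert)
theorem pvFreq_eq_counter (d : PySem.Dict String (List Int)) :
    (PySem.Dict.keys d).foldl (fun f each =>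
        (PySem.Dict.getD d each []).foldl (fun f index =>
          if decide (index > 0) then PySem.Dict.insert f index (PySem.Dict.getD f index 0 + 1) else f) f)
      PySem.Dict.empty
      = PySem.Dict.counter
          (((PySem.Dict.keys d).flatMap (fun e => PySem.Dict.getD d e [])).filter (fun i => decide (i > 0))) := by
  rw [pvFoldl_flatMap, ← PySem.Dict.foldl_insert_getD_add_one_eq_counter, List.foldl_filter]

-- the generator sum over an items list, as a sum of mapped values
theorem pvSum_foldl (key : Int) :
    ∀ (l : List (Int × Int)) (s : Int),
      l.foldl (fun s p => if PySem.Int.mod p.1 key == 0 then s + p.2 else s) s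
        = s + (l.map (fun p => if PySem.Int.mod p.1 key == 0 then p.2 else 0)).sum := by
  intro l
  induction l with
  | nil => intro s; simp
  | cons p l ih =>
      intro s
      rw [List.foldl_cons, ih, List.map_cons, List.sum_cons]
      split_ifs <;> ring

-- counting in a filtered list, pointwise
theorem pvCount_filter (q : Int → Bool) (v : Int) :
    ∀ (P : List Int), (P.filter q).count v = if q v then P.count v else 0 := by
  intro P
  induction P with
  | nil => simp
  | cons b l ih =>
      rw [List.filter_cons]
      by_cases hb : b = v
      · subst hb; cases hq : q b <;> simp [hq, ih]
      · cases hq : q b <;> simp [ih, hb]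

-- counting with multiplicity over the distinct values = counting over the raw list
theorem pvSum_count_eq_countP (q : Int → Bool) (P : List Int) (S : List Int)
    (hnd : S.Nodup) (hmem : ∀ v, v ∈ S ↔ v ∈ P) :
    (S.map (fun v => if q v then (P.count v : Int) else 0)).sum = (P.countP q : Int) := by
  have hfin : S.toFinset = P.toFinset := by
    ext v; simp [List.mem_toFinset, hmem]
  have h2 : ∑ v ∈ P.toFinset, (P.filter q).count v = (P.filter q).length := by
    rw [← List.sum_toFinset_count_eq_length (P.filter q)]
    refine (Finset.sum_subset ?_ ?_).symm
    · intro v hv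
      simp only [List.mem_toFinset, List.mem_filter] at hv ⊢
      exact hv.1
    · intro v _ hv
      simp only [List.mem_toFinset] at hv
      exact List.count_eq_zero.mpr hv
  have h3 : (S.map (fun v => if q v then P.count v else (0 : ℕ))).sum = P.countP q := by
    rw [← List.sum_toFinset _ hnd, hfin]
    have : ∀ v ∈ P.toFinset, (if q v then P.count v else (0 : ℕ)) = (P.filter q).count v :=
      fun v _ => (pvCount_filter q v P).symm
    rw [Finset.sum_congr rfl this, h2, List.countP_eq_length_filter]
  have hmapc : S.map (fun v => if q v then (P.count v : Int) else 0)
      = (S.map (fun v => if q v then P.count v else (0 : ℕ))).map (Nat.cast) := by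
    rw [List.map_map]
    exact List.map_congr_left (fun v _ => by cases hq : q v <;> simp [hq])
  rw [hmapc, ← Nat.cast_list_sum, h3]

-- filtering distributes over the flattening of the per-entry index lists
theorem pvFilter_flatMap (p : Int → Bool) (f : String → List Int) :
    ∀ (es : List String), (es.flatMap f).filter p = es.flatMap (fun e => (f e).filter p) := by
  intro es
  induction es with
  | nil => rfl
  | cons e es ih => simp [List.flatMap_cons, List.filter_append, ih]

-- the two filters pick the same indices (positivity staged first vs tested together)
theorem pvFilter_stage (key : Int) (L : List Int) :
    (L.filter (fun i => decide (i > 0))).filter (fun i => PySem.Int.mod i key == 0)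
      = L.filter (fun i => pvCond i key) := by
  rw [List.filter_filter]
  refine List.filter_congr ?_
  intro i _
  simp [pvCond, Bool.and_comm]

-- ===== VERDICT (by name: the statement is the Claim_ definition above) =====
set_option maxHeartbeats 1000000 in
theorem modOccurances_spec : Claim_equal_modOccurances := by
  intro oc _
  unfold Spec_modOccurances
  simp only [modOccurances, modOccurances_alt,
    show ∀ i k : Int, (PySem.Int.mod i k == 0 && decide (i > 0)) = pvCond i k from fun _ _ => rfl,
    show PySem.List.pyRange 3 21 1 = pvKS from rfl]
  set d := PySem.Dict.ofList oc with hd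
  set L : List Int := (PySem.Dict.keys d).flatMap (fun e => PySem.Dict.getD d e []) with hL
  set P : List Int := L.filter (fun i => decide (i > 0)) with hP
  -- both outer loops insert the 18 fresh distinct keys 3..20 in order
  have hA : ((pvKS.foldl (fun dictSpace key =>
      PySem.Dict.insert dictSpace key (PySem.List.len
        ((PySem.Dict.keys d).foldl (fun ls each =>
          (PySem.Dict.getD d each []).foldl (fun ls index =>
            if pvCond index key then ls ++ [index] else ls) ls) [])))
      (PySem.Dict.empty : PySem.Dict Int Int))).items
      = pvKS.map (fun key => (key, PySem.List.len
          ((PySem.Dict.keys d).foldl (fun ls each =>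
            (PySem.Dict.getD d each []).foldl (fun ls index =>
              if pvCond index key then ls ++ [index] else ls) ls) []))) := by
    have := PySem.Dict.items_foldl_insert_fresh (ν := Int) pvKS (fun k => k)
      (fun key => PySem.List.len
          ((PySem.Dict.keys d).foldl (fun ls each =>
            (PySem.Dict.getD d each []).foldl (fun ls index =>
              if pvCond index key then ls ++ [index] else ls) ls) []))
      PySem.Dict.empty (by intro a _; rfl) (by decide)
    simpa using this
  set freq : PySem.Dict Int Int :=
    (PySem.Dict.keys d).foldl (fun f each =>
      (PySem.Dict.getD d each []).foldl (fun f index =>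
        if decide (index > 0) then PySem.Dict.insert f index (PySem.Dict.getD f index 0 + 1) else f) f)
      PySem.Dict.empty with hfreq
  have hB : ((pvKS.foldl (fun dictSpace key =>
      PySem.Dict.insert dictSpace key
        (freq.items.foldl (fun s p => if PySem.Int.mod p.1 key == 0 then s + p.2 else s) 0))
      (PySem.Dict.empty : PySem.Dict Int Int))).items
      = pvKS.map (fun key => (key,
          freq.items.foldl (fun s p => if PySem.Int.mod p.1 key == 0 then s + p.2 else s) 0)) := by
    have := PySem.Dict.items_foldl_insert_fresh (ν := Int) pvKS (fun k => k)
      (fun key => freq.items.foldl (fun s p => if PySem.Int.mod p.1 key == 0 then s + p.2 else s) 0)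
      PySem.Dict.empty (by intro a _; rfl) (by decide)
    simpa using this
  rw [hA, hB]
  refine List.map_congr_left ?_
  intro key _
  refine Prod.ext rfl ?_
  simp only
  -- A's value at key
  rw [pvA_listSpaces d key (PySem.Dict.keys d) [], List.nil_append,
    ← pvFilter_flatMap (fun i => pvCond i key) (fun e => PySem.Dict.getD d e []) (PySem.Dict.keys d)]
  -- B's value at key
  have hfc : freq = PySem.Dict.counter P := by rw [hfreq, pvFreq_eq_counter]
  rw [hfc, PySem.Dict.items_counter, pvSum_foldl, List.map_map]
  have hstep : ((PySem.Set.ofList P).map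
      ((fun p : Int × Int => if PySem.Int.mod p.1 key == 0 then p.2 else 0) ∘ fun k => (k, (P.count k : Int)))).sum
      = ((PySem.Set.ofList P).map (fun v => if (fun i => PySem.Int.mod i key == 0) v then (P.count v : Int) else 0)).sum := rfl
  rw [hstep, pvSum_count_eq_countP (fun i => PySem.Int.mod i key == 0) P (PySem.Set.ofList P)
        (PySem.Set.nodup_ofList P) (fun v => PySem.Set.mem_ofList P v)]
  rw [List.countP_eq_length_filter, hP, pvFilter_stage]
  simp only [PySem.List.len_eq, zero_add, hL]
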